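-- pv_equiv track=rewrite | github.com/anaksha17/TravelAgentChatbot | backend/utils/travel_prompts.py | generate_follow_up_questions
-- ===== SOURCE A (Python) =====
-- from typing import List, Dict, Optional
--
-- def generate_follow_up_questions(user_message: str) -> List[str]:
--     """Generate relevant follow-up questions based on user input"""
--     message_lower = user_message.lower()
--     questions = []
--
--     if "trip" in message_lower or "travel" in message_lower:
--         questions.extend([
--             "What's your approximate budget for this trip?",
--             "How many days are you planning to travel?",
--             "Are you traveling solo, with family, or friends?"
--         ])
--
--     if any(destination in message_lower for destination in ["paris", "tokyo", "rome", "london"]):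
--         questions.extend([
--             "What time of year are you planning to visit?",
--             "What type of experiences interest you most?",
--             "Do you have any specific must-see attractions in mind?"
--         ])
--
--     if "hotel" in message_lower or "accommodation" in message_lower:
--         questions.extend([
--             "What's your preferred accommodation type?",
--             "Which area of the city would you like to stay in?",
--             "Any specific amenities you need?"
--         ])
--
--     return questions[:3]  # Return max 3 questions
-- ===== SOURCE B (Python) =====
-- def generate_follow_up_questions(user_message: str) -> list:
--     """Generate relevant follow-up questions based on user input.
--
--     Since every keyword group carries exactly three questions and the result is
--     capped at three, only the first matching group can ever appear in the output:
--     return its questions directly (first match wins), with no accumulation and no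
--     final truncation."""
--     m = user_message.lower()
--     return next(
--         (qs for kws, qs in _FOLLOW_UP_RULES if any(k in m for k in kws)),
--         [])
--
-- _FOLLOW_UP_RULES = [
--     (("trip", "travel"), [
--         "What's your approximate budget for this trip?",
--         "How many days are you planning to travel?",
--         "Are you traveling solo, with family, or friends?"
--     ]),
--     (("paris", "tokyo", "rome", "london"), [
--         "What time of year are you planning to visit?",
--         "What type of experiences interest you most?",
--         "Do you have any specific must-see attractions in mind?"
--     ]),
--     (("hotel", "accommodation"), [
--         "What's your preferred accommodation type?",
--         "Which area of the city would you like to stay in?",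
--         "Any specific amenities you need?"
--     ]),
-- ]
-- ===== Notes on version B (the rewrite author's own statement) =====
-- stated objective: simpler
-- what changed: Exploits that every keyword group carries exactly three questions and the output is capped at three, so only the first matching group is visible: B returns the first matching group's questions directly (first-match search over a rule table), eliminating A's accumulation across all matches and the final [:3] truncation.
import Mathlib
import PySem

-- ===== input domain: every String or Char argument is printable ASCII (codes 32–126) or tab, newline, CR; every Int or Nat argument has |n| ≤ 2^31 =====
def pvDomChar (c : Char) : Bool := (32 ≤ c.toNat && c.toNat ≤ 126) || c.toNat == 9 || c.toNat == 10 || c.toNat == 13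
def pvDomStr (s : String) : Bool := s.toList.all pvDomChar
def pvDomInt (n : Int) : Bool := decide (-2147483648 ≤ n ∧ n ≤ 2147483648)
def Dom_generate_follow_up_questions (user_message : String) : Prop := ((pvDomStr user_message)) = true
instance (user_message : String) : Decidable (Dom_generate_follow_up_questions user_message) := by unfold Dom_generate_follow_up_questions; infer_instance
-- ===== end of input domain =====

-- B returns the first matching keyword group's three questions directly (first-match search),
-- instead of A's accumulate-all-matches-then-truncate-to-3; objective: simpler.

-- ===== PORT A =====
def generate_follow_up_questions (user_message : String) : List String :=
  let message_lower := PySem.Str.lower user_message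
  let questions : List String := []
  let questions :=
    if PySem.Str.isIn "trip" message_lower || PySem.Str.isIn "travel" message_lower then
      questions ++ ["What's your approximate budget for this trip?",
                    "How many days are you planning to travel?",
                    "Are you traveling solo, with family, or friends?"]
    else questions
  let questions :=
    if (["paris", "tokyo", "rome", "london"].any (fun d => PySem.Str.isIn d message_lower)) then
      questions ++ ["What time of year are you planning to visit?",
                    "What type of experiences interest you most?",
                    "Do you have any specific must-see attractions in mind?"]
    else questions
  let questions :=
    if PySem.Str.isIn "hotel" message_lower || PySem.Str.isIn "accommodation" message_lower then
      questions ++ ["What's your preferred accommodation type?",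
                    "Which area of the city would you like to stay in?",
                    "Any specific amenities you need?"]
    else questions
  PySem.List.slice questions none (some 3)

-- ===== PORT B =====
def pvFollowUpRules : List (List String × List String) :=
  [(["trip", "travel"],
    ["What's your approximate budget for this trip?",
     "How many days are you planning to travel?",
     "Are you traveling solo, with family, or friends?"]),
   (["paris", "tokyo", "rome", "london"],
    ["What time of year are you planning to visit?",
     "What type of experiences interest you most?",
     "Do you have any specific must-see attractions in mind?"]),
   (["hotel", "accommodation"],
    ["What's your preferred accommodation type?",
     "Which area of the city would you like to stay in?",
     "Any specific amenities you need?"])]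

-- first-match search: next((qs for kws, qs in rules if any(k in m for k in kws)), [])
def pvFirstMatch (m : String) : List (List String × List String) → List String
  | [] => []
  | r :: rs => if r.1.any (fun k => PySem.Str.isIn k m) then r.2 else pvFirstMatch m rs

def generate_follow_up_questions_alt (user_message : String) : List String :=
  let m := PySem.Str.lower user_message
  pvFirstMatch m pvFollowUpRules

-- ===== PRECONDITION & SPEC =====
def Spec_generate_follow_up_questions (user_message : String) (out : List String) : Prop := out = generate_follow_up_questions_alt user_message
instance (user_message : String) (out : List String) : Decidable (Spec_generate_follow_up_questions user_message out) := by unfold Spec_generate_follow_up_questions; infer_instance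

-- ===== CLAIM (what is proved, stated in full; the proofs are below) =====
def Claim_equal_generate_follow_up_questions : Prop := ∀ (user_message : String), Dom_generate_follow_up_questions user_message → Spec_generate_follow_up_questions user_message (generate_follow_up_questions user_message)

-- ===== LEMMAS AND PROOFS =====

-- ===== VERDICT (by name: the statement is the Claim_ definition above) =====
theorem generate_follow_up_questions_spec : Claim_equal_generate_follow_up_questions := by
  intro u _
  unfold Spec_generate_follow_up_questions generate_follow_up_questions
    generate_follow_up_questions_alt pvFollowUpRules
  simp only [pvFirstMatch, List.any_cons, List.any_nil, Bool.or_false]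
  split_ifs <;> simp [PySem.List.slice]
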